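-- pv_equiv track=rewrite | github.com/daniel-reich/turbo-robot | zp64GNJQpZyGpYWL8_14.py | score_it
-- ===== SOURCE A (Python) =====
-- def score_it(k, s=0, x=0, y=0, i=0):
--   if i >= len(k): return s
--   if k[i] == '(': x, i = x + 1, i + 1
--   elif k[i] == ')': y, i = y + 1, i + 1
--   elif k[i] in '0123456789':
--     n = str()
--     while k[i] in '0123456789': n, i = n + k[i], i + 1
--     s += int(n) * (x - y)
--   else: i += 1
--   return score_it(k, s, x, y, i)
-- ===== SOURCE B (Python) =====
-- def score_it(k, s=0, x=0, y=0, i=0):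
--     # Two stages: (1) tokenize the string into parens and numbers,
--     # (2) fold the token list with a single net-depth counter d = x - y.
--     toks = []
--     while i < len(k):
--         c = k[i]
--         if c == '(' or c == ')':
--             toks.append(c)
--             i += 1
--         elif c in '0123456789':
--             run = []
--             while k[i] in '0123456789':
--                 run.append(k[i])
--                 i += 1
--             toks.append(int(''.join(run)))
--         else:
--             i += 1
--     d = x - y
--     for t in toks:
--         if t == '(':
--             d += 1
--         elif t == ')':
--             d -= 1
--         else:
--             s += t * d
--     return s
-- ===== Notes on version B (the rewrite author's own statement) =====
-- stated objective: alternative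
-- what changed: Replaces A's per-character tail recursion carrying one counter per paren kind by a staged pipeline: one pass tokenizes the string into a list of paren tokens and numbers, then a fold over the token list scores it with a single net-depth counter d = x - y.
import Mathlib
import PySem

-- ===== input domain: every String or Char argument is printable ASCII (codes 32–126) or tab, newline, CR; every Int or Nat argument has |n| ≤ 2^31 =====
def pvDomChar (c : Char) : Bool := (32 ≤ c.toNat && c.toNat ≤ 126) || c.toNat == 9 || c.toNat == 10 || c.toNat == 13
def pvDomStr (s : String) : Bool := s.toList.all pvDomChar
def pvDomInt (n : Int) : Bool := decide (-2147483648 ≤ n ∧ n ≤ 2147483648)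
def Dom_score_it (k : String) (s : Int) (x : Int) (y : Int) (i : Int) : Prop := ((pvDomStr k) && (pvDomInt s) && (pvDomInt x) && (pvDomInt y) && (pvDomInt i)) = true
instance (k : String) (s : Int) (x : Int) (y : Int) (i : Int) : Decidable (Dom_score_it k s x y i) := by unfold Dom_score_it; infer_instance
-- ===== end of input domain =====

-- B replaces A's per-character tail recursion (one counter per paren kind) by a
-- staged pipeline: tokenize the string into parens/numbers, then fold the token
-- list with one net-depth counter d = x - y.

-- ===== PORT A =====
-- Both ports' scans run on k.toList with a Nat fuel that only makes the
-- recursion structural: the index rises by ≥ 1 per step, so fuel 2*len+1 is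
-- never exhausted wherever Python returns (pyGet? = none is where the Python
-- raises IndexError — outside Pre_).

-- the characters of the Python digit literal
def pvDigits : List Char := ['0', '1', '2', '3', '4', '5', '6', '7', '8', '9']

-- A's inner digit loop (unbounded while over consecutive digit characters)
def pvRunA (l : List Char) : Nat → List Char → Int → List Char × Int
  | 0, n, i => (n, i)
  | fuel + 1, n, i =>
    match PySem.List.pyGet? l i with
    | some c =>
        if pvDigits.contains c then pvRunA l fuel (n ++ [c]) (i + 1) else (n, i)
    | none => (n, i)

-- A's recursion: one step per call of score_it
def pvScoreA (l : List Char) : Nat → Int → Int → Int → Int → Int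
  | 0, s, _x, _y, _i => s
  | fuel + 1, s, x, y, i =>
    if (l.length : Int) ≤ i then s
    else
      match PySem.List.pyGet? l i with
      | none => s
      | some c =>
        if c = '(' then pvScoreA l fuel s (x + 1) y (i + 1)
        else if c = ')' then pvScoreA l fuel s x (y + 1) (i + 1)
        else if pvDigits.contains c then
          let r := pvRunA l (2 * l.length + 1) [] i
          pvScoreA l fuel (s + (PySem.Int.ofChars? r.1).getD 0 * (x - y)) x y r.2
        else pvScoreA l fuel s x y (i + 1)

def score_it (k : String) (s : Int) (x : Int) (y : Int) (i : Int) : Int :=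
  pvScoreA k.toList (2 * k.toList.length + 1) s x y i

-- ===== PORT B =====
-- a token of Source B's first stage: open paren / close paren / a parsed number
inductive PvTok
  | lp : PvTok
  | rp : PvTok
  | num : Int → PvTok
deriving DecidableEq, Repr

-- B's inner digit run (Source B: append consecutive digit characters, advancing i)
def pvRunB (l : List Char) : Nat → List Char → Int → List Char × Int
  | 0, run, i => (run, i)
  | fuel + 1, run, i =>
    match PySem.List.pyGet? l i with
    | some c =>
        if pvDigits.contains c then pvRunB l fuel (run ++ [c]) (i + 1) else (run, i)
    | none => (run, i)

-- stage 1 of Source B: the `while i < len(k)` loop that builds the token list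
def pvTokenize (l : List Char) : Nat → Int → List PvTok
  | 0, _ => []
  | fuel + 1, i =>
    if i < (l.length : Int) then
      match PySem.List.pyGet? l i with
      | none => []
      | some c =>
        if c = '(' then PvTok.lp :: pvTokenize l fuel (i + 1)
        else if c = ')' then PvTok.rp :: pvTokenize l fuel (i + 1)
        else if pvDigits.contains c then
          let r := pvRunB l (2 * l.length + 1) [] i
          PvTok.num ((PySem.Int.ofChars? r.1).getD 0) :: pvTokenize l fuel r.2
        else pvTokenize l fuel (i + 1)
    else []

-- stage 2 of Source B: the `for t in toks` fold over the token list
def pvEvalToks : List PvTok → Int → Int → Int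
  | [], s, _ => s
  | PvTok.lp :: ts, s, d => pvEvalToks ts s (d + 1)
  | PvTok.rp :: ts, s, d => pvEvalToks ts s (d - 1)
  | PvTok.num v :: ts, s, d => pvEvalToks ts (s + v * d) d

def score_it_alt (k : String) (s : Int) (x : Int) (y : Int) (i : Int) : Int :=
  pvEvalToks (pvTokenize k.toList (2 * k.toList.length + 1) i) s (x - y)

-- ===== PRECONDITION & SPEC =====
-- Pre_ excludes exactly the inputs where the Python A raises IndexError:
-- an initial index below -len(k), or a scan that reaches a digit run ending at
-- the end of the string (the unguarded inner loop then indexes k[len(k)]).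
def Pre_score_it (k : String) (s : Int) (x : Int) (y : Int) (i : Int) : Prop :=
  (k.toList.length : Int) ≤ i ∨
    (-(k.toList.length : Int) ≤ i ∧
      k.toList.getLast?.all (fun c => !pvDigits.contains c) = true)
instance (k : String) (s : Int) (x : Int) (y : Int) (i : Int) : Decidable (Pre_score_it k s x y i) := by unfold Pre_score_it; infer_instance

def pvWitness_score_it : String × Int × Int × Int × Int := ("(3) and (1)(2)x", 0, 0, 0, 0)

def Spec_score_it (k : String) (s : Int) (x : Int) (y : Int) (i : Int) (out : Int) : Prop := out = score_it_alt k s x y i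
instance (k : String) (s : Int) (x : Int) (y : Int) (i : Int) (out : Int) : Decidable (Spec_score_it k s x y i out) := by unfold Spec_score_it; infer_instance

-- ===== CLAIM (what is proved, stated in full; the proofs are below) =====
def Claim_equal_score_it : Prop := ∀ (k : String) (s : Int) (x : Int) (y : Int) (i : Int), Dom_score_it k s x y i → Pre_score_it k s x y i → Spec_score_it k s x y i (score_it k s x y i)

-- ===== LEMMAS AND PROOFS =====
theorem pvRun_eq (l : List Char) (fuel : Nat) (n : List Char) (i : Int) :
    pvRunB l fuel n i = pvRunA l fuel n i := by
  induction fuel generalizing n i with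
  | zero => rfl
  | succ fuel ih =>
      rw [pvRunA, pvRunB]
      cases PySem.List.pyGet? l i with
      | none => rfl
      | some c =>
          dsimp only
          by_cases hc : pvDigits.contains c
          · simp only [hc, if_true]; exact ih _ _
          · rw [if_neg hc, if_neg hc]

-- A's recursion computes exactly the fold of B's token list with d = x - y.
theorem pvScore_eq_eval (l : List Char) (fuel : Nat) (s x y i : Int) :
    pvScoreA l fuel s x y i = pvEvalToks (pvTokenize l fuel i) s (x - y) := by
  induction fuel generalizing s x y i with
  | zero => rfl
  | succ fuel ih =>
      rw [pvScoreA, pvTokenize]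
      by_cases hge : (l.length : Int) ≤ i
      · rw [if_pos hge, if_neg (by omega)]; rfl
      · rw [if_neg hge, if_pos (by omega)]
        cases PySem.List.pyGet? l i with
        | none => rfl
        | some c =>
            dsimp only
            by_cases h1 : c = '('
            · subst h1
              rw [if_pos rfl, if_pos rfl, ih, pvEvalToks]
              have e : x + 1 - y = x - y + 1 := by ring
              rw [e]
            · rw [if_neg h1, if_neg h1]
              by_cases h2 : c = ')'
              · subst h2
                rw [if_pos rfl, if_pos rfl, ih, pvEvalToks]
                have e : x - (y + 1) = x - y - 1 := by ring
                rw [e]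
              · rw [if_neg h2, if_neg h2]
                by_cases hc : pvDigits.contains c
                · rw [if_pos hc, if_pos hc, pvRun_eq, ih, pvEvalToks]
                · rw [if_neg hc, if_neg hc]
                  exact ih _ _ _ _

-- ===== VERDICT (by name: the statement is the Claim_ definition above) =====
theorem score_it_spec : Claim_equal_score_it := by
  intro k s x y i _ _
  unfold Spec_score_it score_it score_it_alt
  exact pvScore_eq_eval k.toList (2 * k.toList.length + 1) s x y i
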